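-- pv_equiv track=rewrite | github.com/cassioaugusto01/beyond-cracking-the-coding-interview | beyondcci.py | max_7_days
-- ===== SOURCE A (Python) =====
-- def max_7_days(sales):
--     l, r = 0, 0
--     window_sum = 0
--     cur_max = 0
--     while r < len(sales):
--         window_sum += sales[r]
--         r += 1
--         if r-l == 7:
--             cur_max = max(cur_max, window_sum)
--             window_sum -= sales[l]
--             l += 1
--     return cur_max
-- ===== SOURCE B (Python) =====
-- def max_7_days(sales):
--     pref = [0]
--     for x in sales:
--         pref.append(pref[-1] + x)
--     cur_max = 0
--     for i in range(len(sales) - 6):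
--         cur_max = max(cur_max, pref[i + 7] - pref[i])
--     return cur_max
-- ===== Notes on version B (the rewrite author's own statement) =====
-- stated objective: alternative
-- what changed: Replaces the incremental sliding-window (add right element, subtract left element, two moving pointers) by a prefix-sum table built in one pass followed by a window-difference pass pref[i+7]-pref[i]; the 0 floor is kept.
import Mathlib
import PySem

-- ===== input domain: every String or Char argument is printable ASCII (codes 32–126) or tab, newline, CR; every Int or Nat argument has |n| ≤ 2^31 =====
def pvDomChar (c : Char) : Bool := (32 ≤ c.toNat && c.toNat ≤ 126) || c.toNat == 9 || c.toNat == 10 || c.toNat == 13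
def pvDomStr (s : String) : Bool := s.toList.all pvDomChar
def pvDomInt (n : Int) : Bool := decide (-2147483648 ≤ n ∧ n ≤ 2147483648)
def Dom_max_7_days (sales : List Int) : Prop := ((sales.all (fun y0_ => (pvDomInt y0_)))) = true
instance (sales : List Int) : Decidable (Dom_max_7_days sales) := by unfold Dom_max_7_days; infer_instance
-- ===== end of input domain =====

-- B replaces A's incremental sliding window by a prefix-sum table plus a window-difference pass (alternative decomposition, same O(n)).

-- ===== PORT A =====
-- while loop ported with fuel = number of remaining iterations (r increments every pass, so
-- the loop runs exactly sales.length times); sales[r] / sales[l] are always in range, so getD 0 is exact.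
def max_7_days_loop (sales : List Int) : Nat → Nat → Nat → Int → Int → Int
  | 0, _, _, _, cm => cm
  | fuel+1, l, r, ws, cm =>
    let ws' := ws + sales.getD r 0
    let r' := r + 1
    if r' - l = 7 then
      max_7_days_loop sales fuel (l+1) r' (ws' - sales.getD l 0) (max cm ws')
    else
      max_7_days_loop sales fuel l r' ws' cm

def max_7_days (sales : List Int) : Int :=
  max_7_days_loop sales sales.length 0 0 0 0

-- ===== PORT B =====
-- pref = [0]; for x in sales: pref.append(pref[-1] + x)
def max_7_days_pref (sales : List Int) : List Int :=
  sales.foldl (fun p x => p ++ [p.getLast! + x]) [0]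

def max_7_days_alt (sales : List Int) : Int :=
  let pref := max_7_days_pref sales
  (List.range (sales.length - 6)).foldl
    (fun cm i => max cm (pref.getD (i + 7) 0 - pref.getD i 0)) 0

-- ===== PRECONDITION & SPEC =====
def Spec_max_7_days (sales : List Int) (out : Int) : Prop := out = max_7_days_alt sales
instance (sales : List Int) (out : Int) : Decidable (Spec_max_7_days sales out) := by unfold Spec_max_7_days; infer_instance

-- ===== CLAIM (what is proved, stated in full; the proofs are below) =====
def Claim_equal_max_7_days : Prop := ∀ (sales : List Int), Dom_max_7_days sales → Spec_max_7_days sales (max_7_days sales)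

-- ===== LEMMAS AND PROOFS =====

-- sum of the 7-window starting at i
def pvWin (sales : List Int) (i : Nat) : Int := ((sales.drop i).take 7).sum

theorem pvPref_scanl (sales : List Int) :
    max_7_days_pref sales = List.scanl (· + ·) 0 sales := by
  have key : ∀ (xs : List Int) (a : Int) (p : List Int),
      xs.foldl (fun p x => p ++ [p.getLast! + x]) (p ++ [a]) =
        p ++ List.scanl (· + ·) a xs := by
    intro xs
    induction xs with
    | nil => intro a p; simp
    | cons x t ih =>
      intro a p
      have hl : (p ++ [a]).getLast! = a := by
        simp [List.getLast!_eq_getLast?_getD]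
      simp only [List.foldl_cons, hl, List.scanl]
      have := ih (a + x) (p ++ [a])
      simpa using this
  have := key sales 0 []
  simpa [max_7_days_pref] using this

theorem pvScanl_getD (sales : List Int) (a : Int) (i : Nat) (h : i ≤ sales.length) :
    (List.scanl (· + ·) a sales).getD i 0 = a + (sales.take i).sum := by
  induction sales generalizing a i with
  | nil =>
    have : i = 0 := by simp at h; omega
    subst this; simp [List.scanl]
  | cons x t ih =>
    cases i with
    | zero => simp [List.scanl_cons]
    | succ j =>
      rw [List.scanl_cons]
      simp only [List.getD_cons_succ, List.take_succ_cons, List.sum_cons]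
      rw [ih (a + x) j (by simpa using h)]
      ring

theorem pvTake_diff (sales : List Int) (i : Nat) :
    (sales.take (i + 7)).sum - (sales.take i).sum = pvWin sales i := by
  rw [List.take_add, List.sum_append]
  simp [pvWin]

-- A's loop invariant: from state (l = r - 6, ws = sum of sales[l..r)), the loop folds max
-- over the window sums starting at l, l+1, …, n-7.
theorem pvLoopA (sales : List Int) (fuel r l : Nat) (ws cm : Int)
    (hfuel : fuel + r = sales.length) (hl : l = r - 6)
    (hws : ws = ((sales.drop l).take (r - l)).sum) :
    max_7_days_loop sales fuel l r ws cm =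
      (List.range' l (sales.length - 6 - l)).foldl (fun m i => max m (pvWin sales i)) cm := by
  induction fuel generalizing r l ws cm with
  | zero =>
    have hr : r = sales.length := by omega
    have : sales.length - 6 - l = 0 := by omega
    simp [max_7_days_loop, this]
  | succ f ih =>
    have hr : r < sales.length := by omega
    have hlr : l ≤ r := by omega
    have hget : sales.getD r 0 = (sales.drop l).getD (r - l) 0 := by
      simp [List.getD_eq_getElem?_getD, List.getElem?_drop, Nat.add_sub_cancel' hlr]
    have hwssucc : ws + sales.getD r 0 = ((sales.drop l).take (r - l + 1)).sum := by
      rw [List.take_add_one, List.sum_append, hws, hget]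
      have hlen : r - l < (sales.drop l).length := by simp; omega
      simp [List.getD_eq_getElem?_getD, List.getElem?_eq_getElem hlen]
    simp only [max_7_days_loop]
    by_cases hcond : r + 1 - l = 7
    · have hr6 : r ≥ 6 := by omega
      have hl' : l = r - 6 := hl
      have hle : l + 7 ≤ sales.length := by omega
      rw [if_pos hcond]
      have hwin : ws + sales.getD r 0 = pvWin sales l := by
        rw [hwssucc]; have : r - l + 1 = 7 := by omega
        rw [this]; rfl
      have hdrop : sales.drop l = sales.getD l 0 :: sales.drop (l + 1) := by
        have hlt : l < sales.length := by omega
        rw [List.drop_eq_getElem_cons hlt]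
        simp [List.getD_eq_getElem?_getD, List.getElem?_eq_getElem hlt]
      have hws'' : ws + sales.getD r 0 - sales.getD l 0 =
          ((sales.drop (l + 1)).take (r + 1 - (l + 1))).sum := by
        rw [hwssucc]
        have h7 : r - l + 1 = 7 := by omega
        have h6 : r + 1 - (l + 1) = 6 := by omega
        rw [h7, h6, hdrop]
        simp [List.take_succ_cons]
      rw [ih (r + 1) (l + 1) _ _ (by omega) (by omega) hws'']
      have hrange : sales.length - 6 - l = (sales.length - 6 - (l + 1)) + 1 := by omega
      rw [hrange, List.range'_succ, List.foldl_cons, hwin]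
    · have hr6 : r < 6 := by omega
      have hl0 : l = 0 := by omega
      rw [if_neg hcond]
      rw [ih (r + 1) l _ _ (by omega) (by omega) (by rw [hwssucc, show r - l + 1 = r + 1 - l by omega])]

theorem pvAltChar (sales : List Int) :
    max_7_days_alt sales =
      (List.range' 0 (sales.length - 6)).foldl (fun m i => max m (pvWin sales i)) 0 := by
  unfold max_7_days_alt
  rw [List.range_eq_range']
  refine PySem.List.foldl_congr_mem _ _ _ _ (fun cm i hi => ?_)
  have hi' : i < sales.length - 6 := by
    have := List.mem_range'.mp hi; omega
  have h1 : i + 7 ≤ sales.length := by omega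
  have h2 : i ≤ sales.length := by omega
  rw [pvPref_scanl, pvScanl_getD sales 0 (i + 7) h1, pvScanl_getD sales 0 i h2]
  rw [show (0 : Int) + (sales.take (i + 7)).sum - (0 + (sales.take i).sum) =
      (sales.take (i + 7)).sum - (sales.take i).sum by ring, pvTake_diff]

-- ===== VERDICT (by name: the statement is the Claim_ definition above) =====
theorem max_7_days_spec : Claim_equal_max_7_days := by
  intro sales _
  unfold Spec_max_7_days
  rw [pvAltChar]
  unfold max_7_days
  exact pvLoopA sales sales.length 0 0 0 0 (by omega) rfl rfl
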